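-- pv_equiv track=rewrite | github.com/opentendril/core | src/patcher.py | _apply_hunk_fuzzy
-- ===== SOURCE A (Python) =====
-- from typing import Optional
--
-- def _apply_hunk_fuzzy(
--     content: str,
--     old_lines: list[str],
--     new_lines: list[str],
-- ) -> Optional[str]:
--     """
--     Indentation-normalised hunk applicator (Pass 2 fallback).
--
--     Algorithm:
--       1. Strip the leading whitespace from each pattern line to get a
--          "canonical" search key.
--       2. Slide a window of len(old_lines) over the file lines.
--       3. For each window position, compare stripped file lines against
--          stripped pattern lines. If all match, record the common indent
--          of the first matched file line.
--       4. Re-indent new_lines using that indent and splice them in.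
--
--     This handles the most common mismatch: the LLM generates
--     "- return 'foo'" (no indent) but the file has "    return 'foo'".
--
--     Returns the modified content string, or None if no match found.
--     """
--     if not old_lines:
--         return None
--
--     file_lines = content.split("\n")
--     n = len(file_lines)
--     k = len(old_lines)
--
--     # Canonical (stripped) versions of the search pattern
--     stripped_old = [l.strip() for l in old_lines]
--
--     # Skip if any pattern line is empty after stripping — too ambiguous
--     if any(s == "" for s in stripped_old):
--         # Allow pure-blank lines to match as wildcards
--         pass
--
--     for start in range(n - k + 1):
--         window = file_lines[start : start + k]
--         stripped_window = [l.strip() for l in window]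
--
--         if stripped_window == stripped_old:
--             # Found a match — determine the indentation from the first
--             # non-blank line in the window.
--             base_indent = ""
--             for wline in window:
--                 if wline.strip():
--                     base_indent = wline[: len(wline) - len(wline.lstrip())]
--                     break
--
--             # Re-indent new_lines: strip their own leading space from the
--             # parser (single char from the prefix), then apply base_indent.
--             re_indented_new = []
--             for nline in new_lines:
--                 # Parser leaves a leading space on context/replacement lines
--                 stripped_n = nline.lstrip()
--                 re_indented_new.append(base_indent + stripped_n if stripped_n else "")
--
--             # Splice: lines before + re-indented new + lines after
--             result_lines = file_lines[:start] + re_indented_new + file_lines[start + k:]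
--             return "\n".join(result_lines)
--
--     return None
-- ===== SOURCE B (Python) =====
-- from typing import Optional
--
--
-- def _apply_hunk_fuzzy(
--     content: str,
--     old_lines: list[str],
--     new_lines: list[str],
-- ) -> Optional[str]:
--     """Indentation-normalised hunk applicator, reduced to one substring
--     search: strip every line once, join the stripped lines with "\n" sentinels
--     and let str.find locate the first window (instead of re-stripping and
--     comparing a window of k lines at each of the n positions)."""
--     if not old_lines:
--         return None
--
--     file_lines = content.split("\n")
--     k = len(old_lines)
--
--     pat = [l.strip() for l in old_lines]
--     if any("\n" in s for s in pat):
--         # A pattern line with an embedded newline can never equal a split file line.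
--         return None
--
--     # "\n".join with empty sentinels brackets every line with newlines, so an
--     # occurrence of `needle` in `hay` is exactly a line-aligned window match.
--     hay = "\n".join([""] + [l.strip() for l in file_lines] + [""])
--     needle = "\n".join([""] + pat + [""])
--     pos = hay.find(needle)
--     if pos == -1:
--         return None
--     start = hay[:pos].count("\n")
--
--     window = file_lines[start:start + k]
--     base_indent = next(
--         (w[:len(w) - len(w.lstrip())] for w in window if w.strip()), "")
--     new_block = [base_indent + s if (s := ln.lstrip()) else ""
--                  for ln in new_lines]
--     return "\n".join(file_lines[:start] + new_block + file_lines[start + k:])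
-- ===== Notes on version B (the rewrite author's own statement) =====
-- stated objective: alternative
-- what changed: Instead of re-stripping and comparing a k-line window at each of the n start positions, B strips every line once, joins the stripped file lines and the stripped pattern with "\n" sentinels, and locates the first line-aligned window with a single str.find substring search, recovering the line index by counting newlines before the hit.
import Mathlib
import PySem

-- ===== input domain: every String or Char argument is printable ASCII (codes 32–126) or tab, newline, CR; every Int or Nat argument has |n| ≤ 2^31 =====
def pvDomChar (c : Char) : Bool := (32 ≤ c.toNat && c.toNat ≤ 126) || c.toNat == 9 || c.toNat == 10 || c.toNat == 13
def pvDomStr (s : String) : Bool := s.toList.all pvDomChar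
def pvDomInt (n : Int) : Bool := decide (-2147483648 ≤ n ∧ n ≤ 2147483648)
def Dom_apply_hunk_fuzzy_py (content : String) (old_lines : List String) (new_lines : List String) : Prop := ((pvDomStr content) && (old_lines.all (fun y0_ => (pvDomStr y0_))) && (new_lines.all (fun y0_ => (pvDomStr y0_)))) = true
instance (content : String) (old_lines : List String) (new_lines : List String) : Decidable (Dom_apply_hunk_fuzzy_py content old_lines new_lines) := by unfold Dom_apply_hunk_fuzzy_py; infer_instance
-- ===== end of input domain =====

-- B re-implements A's sliding-window scan differently: strip every line once and
-- run ONE substring search (str.find) over the "\n"-sentinel join of the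
-- stripped lines; the return value is proved equal on all inputs.

-- ===== PORT A =====
-- inner 'for wline in window: if wline.strip(): base_indent = ...; break'
def pvA_indent : List String → String
  | [] => ""
  | w :: ws =>
    if PySem.Str.strip w ≠ "" then
      PySem.Str.slice w none (some (PySem.Str.len w - PySem.Str.len (PySem.Str.lstrip w)))
    else pvA_indent ws

-- the body executed when a window matches (re-indent new_lines, splice, join)
def pvA_body (file_lines new_lines : List String) (k start : Int) : String :=
  let window := PySem.List.slice file_lines (some start) (some (start + k))
  let base_indent := pvA_indent window
  let re_indented_new := new_lines.foldl (fun acc nline =>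
    let stripped_n := PySem.Str.lstrip nline
    acc ++ [if stripped_n ≠ "" then base_indent ++ stripped_n else ""]) []
  let result_lines := PySem.List.slice file_lines none (some start) ++ re_indented_new ++
    PySem.List.slice file_lines (some (start + k)) none
  PySem.Str.join "\n" result_lines

-- 'for start in range(n - k + 1): ... return ...' with early return
def pvA_loop (file_lines stripped_old new_lines : List String) (k : Int) :
    List Int → Option String
  | [] => none
  | start :: rest =>
    let window := PySem.List.slice file_lines (some start) (some (start + k))
    let stripped_window := window.map PySem.Str.strip
    if stripped_window = stripped_old then
      some (pvA_body file_lines new_lines k start)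
    else pvA_loop file_lines stripped_old new_lines k rest

def apply_hunk_fuzzy_py (content : String) (old_lines : List String) (new_lines : List String) : Option String :=
  if old_lines = [] then none
  else
    -- content.split("\n"): the separator is the nonempty literal "\n", so split? is `some`
    let file_lines := (PySem.Str.split? content "\n").getD []
    let n := PySem.List.len file_lines
    let k := PySem.List.len old_lines
    let stripped_old := old_lines.map PySem.Str.strip
    pvA_loop file_lines stripped_old new_lines k (PySem.List.pyRange 0 (n - k + 1) 1)

-- ===== PORT B =====
-- next((w[:len(w)-len(w.lstrip())] for w in window if w.strip()), "")
def pvB_indent (window : List String) : String :=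
  match window.find? (fun w => decide (PySem.Str.strip w ≠ "")) with
  | some w => PySem.Str.slice w none (some (PySem.Str.len w - PySem.Str.len (PySem.Str.lstrip w)))
  | none => ""

def apply_hunk_fuzzy_py_alt (content : String) (old_lines : List String) (new_lines : List String) : Option String :=
  if old_lines = [] then none
  else
    let file_lines := (PySem.Str.split? content "\n").getD []
    let k := PySem.List.len old_lines
    let pat := old_lines.map PySem.Str.strip
    if pat.any (fun s => PySem.Str.isIn "\n" s) then none
    else
      let hay := PySem.Str.join "\n" ([""] ++ file_lines.map PySem.Str.strip ++ [""])
      let needle := PySem.Str.join "\n" ([""] ++ pat ++ [""])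
      let pos := PySem.Str.find hay needle
      if pos = -1 then none
      else
        let start : Int := (PySem.Str.count (PySem.Str.slice hay none (some pos)) "\n" : Int)
        let window := PySem.List.slice file_lines (some start) (some (start + k))
        let base_indent := pvB_indent window
        let new_block := new_lines.map (fun ln =>
          let s := PySem.Str.lstrip ln
          if s ≠ "" then base_indent ++ s else "")
        some (PySem.Str.join "\n" (PySem.List.slice file_lines none (some start) ++ new_block ++
          PySem.List.slice file_lines (some (start + k)) none))

-- ===== PRECONDITION & SPEC =====
def Spec_apply_hunk_fuzzy_py (content : String) (old_lines : List String) (new_lines : List String) (out : Option String) : Prop := out = apply_hunk_fuzzy_py_alt content old_lines new_lines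
instance (content : String) (old_lines : List String) (new_lines : List String) (out : Option String) : Decidable (Spec_apply_hunk_fuzzy_py content old_lines new_lines out) := by unfold Spec_apply_hunk_fuzzy_py; infer_instance

-- ===== CLAIM (what is proved, stated in full; the proofs are below) =====
def Claim_equal_apply_hunk_fuzzy_py : Prop := ∀ (content : String) (old_lines : List String) (new_lines : List String), Dom_apply_hunk_fuzzy_py content old_lines new_lines → Spec_apply_hunk_fuzzy_py content old_lines new_lines (apply_hunk_fuzzy_py content old_lines new_lines)

-- ===== LEMMAS AND PROOFS =====

-- '\n'-sentinel encoding of a list of newline-free lines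
def pvF (ts : List (List Char)) : List Char := '\n' :: (ts.map (fun l => l ++ ['\n'])).flatten

-- char position of the boundary before line j
def pvPos (ts : List (List Char)) (j : Nat) : Nat := (((ts.take j).map (fun l => l.length + 1)).sum)

-- the window-match test both programs decide at line start s
def pvMatchB (fl pat : List String) (k s : Int) : Bool :=
  decide ((PySem.List.slice fl (some s) (some (s + k))).map PySem.Str.strip = pat)

lemma pvF_cons (t : List Char) (ts : List (List Char)) : pvF (t :: ts) = ('\n' :: t) ++ pvF ts := by
  simp [pvF]

lemma pvF_ne_nil (ts : List (List Char)) : pvF ts ≠ [] := by simp [pvF]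

lemma pvPos_succ (t : List Char) (ts : List (List Char)) (j : Nat) :
    pvPos (t :: ts) (j + 1) = t.length + 1 + pvPos ts j := by
  simp [pvPos]

lemma pvSep_cancel {p t a b : List Char} (hp : '\n' ∉ p) (ht : '\n' ∉ t)
    (h : p ++ '\n' :: a <+: t ++ '\n' :: b) : p = t ∧ a <+: b := by
  induction p generalizing t with
  | nil =>
    cases t with
    | nil => simpa using h
    | cons c t' =>
      rw [List.nil_append, List.cons_append] at h
      have h1 := (List.cons_prefix_cons.mp h).1
      exact absurd (h1 ▸ List.mem_cons_self) ht
  | cons x p' ih =>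
    cases t with
    | nil =>
      rw [List.cons_append, List.nil_append] at h
      have h1 := (List.cons_prefix_cons.mp h).1
      exact absurd (h1 ▸ List.mem_cons_self) hp
    | cons c t' =>
      rw [List.cons_append, List.cons_append] at h
      obtain ⟨h1, h2⟩ := List.cons_prefix_cons.mp h
      have hp' : '\n' ∉ p' := fun hm => hp (List.mem_cons_of_mem _ hm)
      have ht' : '\n' ∉ t' := fun hm => ht (List.mem_cons_of_mem _ hm)
      obtain ⟨h3, h4⟩ := ih hp' ht' h2
      exact ⟨by rw [h1, h3], h4⟩

lemma pvF_prefix_iff {ps ts : List (List Char)} (hps : ∀ l ∈ ps, '\n' ∉ l)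
    (hts : ∀ l ∈ ts, '\n' ∉ l) : pvF ps <+: pvF ts ↔ ps <+: ts := by
  induction ps generalizing ts with
  | nil =>
    simp only [List.nil_prefix, iff_true]
    exact ⟨(pvF ts).tail, by simp [pvF]⟩
  | cons p ps' ih =>
    cases ts with
    | nil =>
      simp only [pvF_cons]
      constructor
      · intro h
        have := h.length_le
        simp [pvF] at this
      · intro h; exact absurd h (by simp)
    | cons t ts' =>
      rw [pvF_cons, pvF_cons, List.cons_append, List.cons_append]
      rw [List.cons_prefix_cons]
      simp only [true_and]
      have hp := hps p List.mem_cons_self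
      have ht := hts t List.mem_cons_self
      have hps' : ∀ l ∈ ps', '\n' ∉ l := fun l hl => hps l (List.mem_cons_of_mem _ hl)
      have hts' : ∀ l ∈ ts', '\n' ∉ l := fun l hl => hts l (List.mem_cons_of_mem _ hl)
      constructor
      · intro h
        obtain ⟨h1, h2⟩ := pvSep_cancel hp ht (by simpa [pvF] using h)
        rw [List.cons_prefix_cons]
        have hP : pvF ps' <+: pvF ts' := by
          unfold pvF; exact List.cons_prefix_cons.mpr ⟨rfl, h2⟩
        exact ⟨h1, (ih hps' hts').mp hP⟩
      · intro h
        obtain ⟨h1, h2⟩ := List.cons_prefix_cons.mp h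
        subst h1
        obtain ⟨r, hr⟩ := (ih hps' hts').mpr h2
        exact ⟨r, by rw [List.append_assoc, hr]⟩

lemma pvF_drop_iff {ps ts : List (List Char)} (hps : ∀ l ∈ ps, '\n' ∉ l)
    (hts : ∀ l ∈ ts, '\n' ∉ l) (n : Nat) :
    pvF ps <+: (pvF ts).drop n ↔ ∃ j, j ≤ ts.length ∧ n = pvPos ts j ∧ ps <+: ts.drop j := by
  induction ts generalizing n with
  | nil =>
    cases n with
    | zero =>
      simp only [List.drop_zero]
      rw [pvF_prefix_iff hps (by simp)]
      constructor
      · intro h; exact ⟨0, by simp, rfl, by simpa using h⟩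
      · rintro ⟨j, hj, -, h⟩
        have : j = 0 := by simpa using hj
        subst this
        simpa using h
    | succ m =>
      constructor
      · intro h
        have : pvF ps = [] := by
          have h2 : (pvF []).drop (m+1) = [] := by simp [pvF]
          rw [h2] at h
          exact List.prefix_nil.mp h
        exact absurd this (pvF_ne_nil ps)
      · rintro ⟨j, hj, hn, -⟩
        have : j = 0 := by simpa using hj
        subst this
        simp [pvPos] at hn
  | cons t ts' ih =>
    have ht := hts t List.mem_cons_self
    have hts' : ∀ l ∈ ts', '\n' ∉ l := fun l hl => hts l (List.mem_cons_of_mem _ hl)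
    cases n with
    | zero =>
      simp only [List.drop_zero]
      rw [pvF_prefix_iff hps hts]
      constructor
      · intro h; exact ⟨0, by simp, rfl, by simpa using h⟩
      · rintro ⟨j, hj, hn, h⟩
        cases j with
        | zero => simpa using h
        | succ j' => rw [pvPos_succ] at hn; omega
    | succ m =>
      by_cases hm : m < t.length
      · -- inside line t: no match possible, and no boundary has this position
        constructor
        · intro h
          exfalso
          have hdrop : (pvF (t :: ts')).drop (m+1) = t.drop m ++ pvF ts' := by
            rw [pvF_cons]
            rw [show ('\n' :: t) ++ pvF ts' = '\n' :: (t ++ pvF ts') from rfl]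
            rw [List.drop_succ_cons, List.drop_append]
            simp [Nat.sub_eq_zero_of_le (le_of_lt hm)]
          rw [hdrop] at h
          obtain ⟨r, hr⟩ := h
          have hh := congrArg List.head? hr
          rw [List.head?_append, List.head?_append, List.head?_drop,
            List.getElem?_eq_getElem hm] at hh
          simp [pvF] at hh
          exact ht (hh ▸ List.getElem_mem _)
        · rintro ⟨j, hj, hn, -⟩
          cases j with
          | zero => simp [pvPos] at hn
          | succ j' => rw [pvPos_succ] at hn; omega
      · -- at or past the boundary after t
        have hdrop : (pvF (t :: ts')).drop (m+1) = (pvF ts').drop (m - t.length) := by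
          rw [pvF_cons]
          have : m + 1 = ('\n' :: t).length + (m - t.length) := by simp; omega
          rw [this, List.drop_length_add_append]
        rw [hdrop, ih hts' (m - t.length)]
        constructor
        · rintro ⟨j, hj, hn, h⟩
          refine ⟨j + 1, by simpa using hj, ?_, by simpa using h⟩
          rw [pvPos_succ]; omega
        · rintro ⟨j, hj, hn, h⟩
          cases j with
          | zero => simp [pvPos] at hn
          | succ j' =>
            rw [pvPos_succ] at hn
            exact ⟨j', by simpa using hj, by omega, by simpa using h⟩

lemma pvPos_strict {ts : List (List Char)} {i j : Nat} (hij : i < j) (hj : j ≤ ts.length) :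
    pvPos ts i < pvPos ts j := by
  induction ts generalizing i j with
  | nil => simp at hj; omega
  | cons t ts' ih =>
    cases j with
    | zero => omega
    | succ j' =>
      cases i with
      | zero =>
        rw [pvPos_succ]
        simp only [pvPos, List.take_zero, List.map_nil, List.sum_nil]
        omega
      | succ i' =>
        rw [pvPos_succ, pvPos_succ]
        have := ih (i := i') (j := j') (by omega) (by simpa using hj)
        omega

lemma pvCount_take {ts : List (List Char)} (hts : ∀ l ∈ ts, '\n' ∉ l) {j : Nat}
    (hj : j ≤ ts.length) : ((pvF ts).take (pvPos ts j)).count '\n' = j := by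
  induction ts generalizing j with
  | nil =>
    have : j = 0 := by simpa using hj
    subst this
    simp [pvPos]
  | cons t ts' ih =>
    have ht := hts t List.mem_cons_self
    have hts' : ∀ l ∈ ts', '\n' ∉ l := fun l hl => hts l (List.mem_cons_of_mem _ hl)
    cases j with
    | zero => simp [pvPos]
    | succ j' =>
      rw [pvPos_succ, pvF_cons]
      have : t.length + 1 + pvPos ts' j' = ('\n' :: t).length + pvPos ts' j' := by simp
      rw [this, List.take_length_add_append]
      rw [List.count_append]
      have h1 : ('\n' :: t).count '\n' = 1 := by
        simp [List.count_eq_zero.mpr ht]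
      rw [h1, ih hts' (by simpa using hj)]
      omega

lemma pvCountGo_single (c : Char) (fuel : Nat) (l : List Char) (acc : Nat)
    (h : l.length ≤ fuel) : PySem.Chars.count.go [c] fuel l acc = acc + l.count c := by
  induction fuel generalizing l acc with
  | zero =>
    have : l = [] := by cases l <;> simp_all
    subst this
    simp [PySem.Chars.count.go]
  | succ f ih =>
    cases l with
    | nil => simp [PySem.Chars.count.go]
    | cons x rest =>
      rw [PySem.Chars.count.go]
      by_cases hx : c = x
      · subst hx
        simp only [List.isPrefixOf, Bool.and_true, beq_self_eq_true, if_pos]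
        rw [show List.drop [c].length (c :: rest) = rest from rfl,
          ih rest (acc + 1) (by simpa using h)]
        simp
        omega
      · have hbx : (c == x) = false := by simp [hx]
        simp only [List.isPrefixOf, Bool.and_true, hbx, Bool.false_eq_true, not_false_iff,
          if_neg]
        rw [ih rest acc (by simpa using h)]
        simp [Ne.symm hx]

lemma pvCount_single (l : List Char) (c : Char) : PySem.Chars.count l [c] = l.count c := by
  rw [PySem.Chars.count]
  simp [pvCountGo_single c l.length l 0 le_rfl]

lemma pvSplitGo_noNL (c : Char) (fuel : Nat) (l cur : List Char) (acc : List (List Char))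
    (hf : l.length < fuel) (hacc : ∀ q ∈ acc, c ∉ q) (hcur : c ∉ cur) :
    ∀ p ∈ PySem.Chars.splitOn.go [c] fuel l cur acc, c ∉ p := by
  induction fuel generalizing l cur acc with
  | zero => omega
  | succ f ih =>
    cases l with
    | nil =>
      rw [PySem.Chars.splitOn.go]
      · intro p hp
        simp only [List.mem_reverse, List.mem_cons] at hp
        rcases hp with h | h
        · subst h; simpa using hcur
        · exact hacc p h
      · omega
    | cons x rest =>
      rw [PySem.Chars.splitOn.go]
      by_cases hx : c = x
      · subst hx
        simp only [List.isPrefixOf, Bool.and_true, beq_self_eq_true, if_pos]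
        exact ih _ _ _ (by simpa using hf)
          (by intro q hq; rcases List.mem_cons.mp hq with h | h
              · subst h; simpa using hcur
              · exact hacc q h)
          (by simp)
      · have hbx : (c == x) = false := by simp [hx]
        simp only [List.isPrefixOf, Bool.and_true, hbx]
        rw [if_neg (by simp)]
        exact ih _ _ _ (by simpa using hf)
          hacc (by simp only [List.mem_cons, not_or]; exact ⟨hx, hcur⟩)

lemma pvSplitOn_noNL (s : List Char) (c : Char) :
    ∀ p ∈ PySem.Chars.splitOn s [c], c ∉ p := by
  rw [PySem.Chars.splitOn]
  exact pvSplitGo_noNL c (s.length + 1) s [] [] (by omega) (by simp) (by simp)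

lemma pvStrip_noNL {l : List Char} {c : Char} (h : c ∉ l) : c ∉ PySem.Chars.strip l := by
  rw [PySem.Chars.strip, PySem.Chars.rstrip, PySem.Chars.lstrip]
  intro hm
  apply h
  have hm1 : c ∈ List.dropWhile PySem.Chars.isspace
      (List.dropWhile PySem.Chars.isspace l).reverse := List.mem_reverse.mp hm
  have hm2 : c ∈ (List.dropWhile PySem.Chars.isspace l).reverse :=
    (List.dropWhile_suffix _).subset hm1
  exact (List.dropWhile_suffix _).subset (List.mem_reverse.mp hm2)

lemma pvIntercalate_cons (sep x : List Char) (l : List (List Char)) (h : l ≠ []) :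
    List.intercalate sep (x :: l) = x ++ sep ++ List.intercalate sep l := by
  obtain ⟨y, l, rfl⟩ := List.exists_cons_of_ne_nil h
  simp [List.intercalate, List.intersperse]

lemma pvJoin_sentinel_aux (c : Char) (xs : List (List Char)) :
    List.intercalate [c] (xs ++ [[]]) = (xs.map (fun l => l ++ [c])).flatten := by
  induction xs with
  | nil => simp [List.intercalate]
  | cons x xs' ih =>
    rw [List.cons_append, pvIntercalate_cons _ _ _ (by simp), ih]
    simp

lemma pvJoin_sentinel (xs : List (List Char)) :
    PySem.Chars.join ['\n'] ([[]] ++ xs ++ [[]]) = pvF xs := by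
  rw [PySem.Chars.join, List.append_assoc,
    show ([[]] ++ (xs ++ [[]]) : List (List Char)) = [] :: (xs ++ [[]]) from rfl,
    pvIntercalate_cons _ _ _ (by simp), pvJoin_sentinel_aux]
  simp [pvF]

lemma pvMapToList_prefix (xs ys : List String) :
    xs.map String.toList <+: ys.map String.toList ↔ xs <+: ys := by
  constructor
  · intro h
    rw [List.prefix_iff_eq_take] at h ⊢
    rw [← List.map_take] at h
    simp only [List.length_map] at h
    exact List.map_injective_iff.mpr (fun a b hab => String.toList_inj.mp hab) h
  · exact fun h => h.map _

lemma pvMem_singleton_infix {c : Char} {l : List Char} : [c] <:+: l ↔ c ∈ l := by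
  constructor
  · rintro ⟨s, t, rfl⟩
    simp
  · intro h
    obtain ⟨s, t, rfl⟩ := List.append_of_mem h
    exact ⟨s, t, by simp⟩

lemma pvIndent_eq (w : List String) : pvA_indent w = pvB_indent w := by
  induction w with
  | nil => rfl
  | cons x ws ih =>
    rw [pvA_indent, pvB_indent]
    by_cases h : PySem.Str.strip x ≠ ""
    · rw [if_pos h, List.find?_cons_of_pos (by simpa using h)]
    · rw [if_neg h, List.find?_cons_of_neg (by simpa using h), ih, pvB_indent]

lemma pvA_loop_eq (fl so nl : List String) (k : Int) (l : List Int) :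
    pvA_loop fl so nl k l =
      (l.find? (pvMatchB fl so k)).map (fun s => pvA_body fl nl k s) := by
  induction l with
  | nil => rfl
  | cons s rest ih =>
    rw [pvA_loop]
    by_cases h : (PySem.List.slice fl (some s) (some (s + k))).map PySem.Str.strip = so
    · rw [if_pos h, List.find?_cons_of_pos (by simpa [pvMatchB] using h)]
      rfl
    · rw [if_neg h, List.find?_cons_of_neg (by simpa [pvMatchB] using h), ih]

lemma pvFind?_range_eq_some {p : Nat → Bool} {m j : Nat} (hj : j < m) (hp : p j = true)
    (hmin : ∀ i, i < j → p i = false) : (List.range m).find? p = some j := by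
  induction j generalizing p m with
  | zero =>
    obtain ⟨m', rfl⟩ := Nat.exists_eq_succ_of_ne_zero (by omega : m ≠ 0)
    rw [List.range_succ_eq_map]
    exact List.find?_cons_of_pos hp
  | succ j' ih =>
    obtain ⟨m', rfl⟩ := Nat.exists_eq_succ_of_ne_zero (by omega : m ≠ 0)
    rw [List.range_succ_eq_map]
    rw [List.find?_cons_of_neg (by simp [hmin 0 (by omega)])]
    rw [List.find?_map]
    have := ih (p := p ∘ Nat.succ) (m := m') (by omega) (by simpa using hp)
      (fun i hi => by simpa using hmin (i+1) (by omega))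
    rw [this]
    rfl

lemma pvMatch_iff (fl pat : List String) (j : Nat) :
    pvMatchB fl pat (pat.length : Int) (j : Int) = true ↔
      pat <+: (fl.map PySem.Str.strip).drop j := by
  rw [pvMatchB, decide_eq_true_iff]
  rw [PySem.List.slice_natCast_add]
  rw [List.map_take, List.map_drop]
  rw [List.prefix_iff_eq_take]
  rw [eq_comm]

-- pieces of content.split("\n") contain no newline
lemma pvSplitStr_noNL (content : String) :
    ∀ w ∈ (PySem.Str.split? content "\n").getD [], '\n' ∉ w.toList := by
  have h := PySem.Str.split?_map content "\n"
  cases hs : PySem.Str.split? content "\n" with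
  | none => simp
  | some l' =>
    rw [hs] at h
    rw [PySem.Chars.split?] at h
    rw [show ("\n".toList : List Char) = ['\n'] from rfl] at h
    simp only [List.isEmpty_cons, Option.map_some] at h
    intro w hw
    have hmem : w.toList ∈ PySem.Chars.splitOn content.toList ['\n'] := by
      rw [← Option.some_inj.mp h]
      exact List.mem_map_of_mem (by simpa using hw)
    exact pvSplitOn_noNL content.toList '\n' w.toList hmem

-- the sentinel join of stripped lines, on the char level
lemma pvJoinStr (X : List String) :
    (PySem.Str.join "\n" ([""] ++ X ++ [""])).toList = pvF (X.map String.toList) := by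
  rw [PySem.Str.toList_join]
  rw [show ("\n".toList : List Char) = ['\n'] from rfl]
  rw [List.map_append, List.map_append]
  rw [show (([""] : List String).map String.toList) = [[]] from rfl]
  exact pvJoin_sentinel _

-- ===== VERDICT (by name: the statement is the Claim_ definition above) =====
theorem apply_hunk_fuzzy_py_spec : Claim_equal_apply_hunk_fuzzy_py := by
  intro content old_lines new_lines _
  unfold Spec_apply_hunk_fuzzy_py
  by_cases h0 : old_lines = []
  · simp [apply_hunk_fuzzy_py, apply_hunk_fuzzy_py_alt, h0]
  · simp only [apply_hunk_fuzzy_py, apply_hunk_fuzzy_py_alt, if_neg h0]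
    set fl := (PySem.Str.split? content "\n").getD [] with hfl
    set pat := old_lines.map PySem.Str.strip with hpat
    have hk : PySem.List.len old_lines = (pat.length : Int) := by
      simp [PySem.List.len_eq, hpat]
    rw [hk, PySem.List.len_eq]
    have hpat0 : pat ≠ [] := by simp [hpat, h0]
    have hflN : ∀ w ∈ fl, '\n' ∉ w.toList := pvSplitStr_noNL content
    have htsN : ∀ l ∈ (fl.map PySem.Str.strip).map String.toList, '\n' ∉ l := by
      intro l hl
      simp only [List.map_map, List.mem_map] at hl
      obtain ⟨w, hw, rfl⟩ := hl
      simp only [Function.comp_apply, PySem.Str.toList_strip]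
      exact pvStrip_noNL (hflN _ hw)
    by_cases hg : pat.any (fun s => PySem.Str.isIn "\n" s)
    · rw [if_pos hg]
      rw [pvA_loop_eq]
      rw [List.find?_eq_none.mpr ?_]
      · rfl
      intro s hs
      simp only [pvMatchB, decide_eq_true_iff]
      intro heq
      obtain ⟨bad, hbad, hbadIn⟩ := List.any_eq_true.mp hg
      have hbadNL : '\n' ∈ bad.toList := by
        have h1 := (PySem.Str.isIn_iff_infix _ _).mp hbadIn
        exact pvMem_singleton_infix.mp (by simpa using h1)
      rw [← heq] at hbad
      obtain ⟨w, hw, rfl⟩ := List.mem_map.mp hbad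
      have h2 := pvStrip_noNL (hflN w (PySem.List.mem_of_mem_slice _ _ _ hw))
      rw [PySem.Str.toList_strip] at hbadNL
      exact h2 hbadNL
    · rw [if_neg hg]
      have hgf : ∀ s ∈ pat, PySem.Str.isIn "\n" s = false := by
        intro s hsm
        by_contra hcon
        exact hg (List.any_eq_true.mpr ⟨s, hsm, by simpa using hcon⟩)
      have hpsN : ∀ l ∈ pat.map String.toList, '\n' ∉ l := by
        intro l hl hc
        obtain ⟨s, hsmem, rfl⟩ := List.mem_map.mp hl
        have h1 : PySem.Str.isIn "\n" s = true := by
          rw [PySem.Str.isIn_iff_infix]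
          simpa using pvMem_singleton_infix.mpr hc
        rw [hgf s hsmem] at h1
        exact Bool.false_ne_true h1
      set hay := PySem.Str.join "\n" ([""] ++ fl.map PySem.Str.strip ++ [""]) with hhayd
      set needle := PySem.Str.join "\n" ([""] ++ pat ++ [""]) with hneedled
      have hhay : hay.toList = pvF ((fl.map PySem.Str.strip).map String.toList) := pvJoinStr _
      have hneedle : needle.toList = pvF (pat.map String.toList) := pvJoinStr _
      have hiff : ∀ j : Nat, (pat <+: (fl.map PySem.Str.strip).drop j) ↔
          pat.map String.toList <+: ((fl.map PySem.Str.strip).map String.toList).drop j := by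
        intro j
        conv_rhs => rw [← List.map_drop]
        exact (pvMapToList_prefix _ _).symm
      by_cases hpos : PySem.Str.find hay needle = -1
      · rw [if_pos hpos]
        rw [pvA_loop_eq]
        rw [List.find?_eq_none.mpr ?_]
        · rfl
        intro s hs hmatch
        have h1 : 0 ≤ s := (PySem.List.mem_pyRange_one.mp hs).1
        obtain ⟨j, rfl⟩ := Int.eq_ofNat_of_zero_le h1
        have hpm : pat <+: (fl.map PySem.Str.strip).drop j := (pvMatch_iff fl pat j).mp hmatch
        have hps : pat.map String.toList <+: ((fl.map PySem.Str.strip).map String.toList).drop j :=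
          (hiff j).mp hpm
        have hjle : j ≤ ((fl.map PySem.Str.strip).map String.toList).length := by
          by_contra hgt
          rw [List.drop_eq_nil_of_le (by omega)] at hps
          have h2 : pat.map String.toList = [] := List.prefix_nil.mp hps
          exact hpat0 (by simpa using h2)
        have hinf : pvF (pat.map String.toList) <+:
            (pvF ((fl.map PySem.Str.strip).map String.toList)).drop
              (pvPos ((fl.map PySem.Str.strip).map String.toList) j) :=
          (pvF_drop_iff hpsN htsN _).mpr ⟨j, hjle, rfl, hps⟩
        have hne : PySem.Chars.find hay.toList needle.toList ≠ -1 := by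
          rw [PySem.Chars.find_ne_neg_one_iff]
          obtain ⟨r, hr⟩ := hinf
          refine ⟨(pvF ((fl.map PySem.Str.strip).map String.toList)).take
            (pvPos ((fl.map PySem.Str.strip).map String.toList) j), r, ?_⟩
          rw [hhay, hneedle, List.append_assoc, hr, List.take_append_drop]
        rw [PySem.Str.find_eq] at hpos
        exact hne hpos
      · rw [if_neg hpos]
        rw [PySem.Str.find_eq] at hpos
        have hge : 0 ≤ PySem.Chars.find hay.toList needle.toList := by
          have h1 := PySem.Chars.neg_one_le_find (s := hay.toList) (sub := needle.toList)
          omega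
        obtain ⟨hpre, hmin⟩ := PySem.Chars.find_spec hge
        have hpre' : pvF (pat.map String.toList) <+:
            (pvF ((fl.map PySem.Str.strip).map String.toList)).drop
              (PySem.Chars.find hay.toList needle.toList).toNat := by
          rw [← hhay, ← hneedle]
          exact hpre
        obtain ⟨j0, hj0le, hposEq, hps0⟩ := (pvF_drop_iff hpsN htsN _).mp hpre'
        have hpm0 : pat <+: (fl.map PySem.Str.strip).drop j0 := (hiff j0).mpr hps0
        have hlenpref := hpm0.length_le
        rw [List.length_drop] at hlenpref
        simp only [List.length_map] at hlenpref
        have hlents : ((fl.map PySem.Str.strip).map String.toList).length = fl.length := by simp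
        have hj0le' : j0 ≤ ((fl.map PySem.Str.strip).map String.toList).length := hj0le
        rw [hlents] at hj0le
        have hj0lt : j0 < (((fl.length : Int)) - (pat.length : Int) + 1).toNat := by omega
        have hminline : ∀ i : Nat, i < j0 →
            ((pvMatchB fl pat (pat.length : Int)) ∘ (fun j : Nat => (0 : Int) + ↑j)) i = false := by
          intro i hi
          simp only [Function.comp_apply, zero_add]
          by_contra hcon
          rw [Bool.not_eq_false] at hcon
          have hpmi : pat <+: (fl.map PySem.Str.strip).drop i := (pvMatch_iff fl pat i).mp hcon
          have hpsi := (hiff i).mp hpmi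
          have hinf : pvF (pat.map String.toList) <+:
              (pvF ((fl.map PySem.Str.strip).map String.toList)).drop
                (pvPos ((fl.map PySem.Str.strip).map String.toList) i) :=
            (pvF_drop_iff hpsN htsN _).mpr ⟨i, by rw [hlents]; omega, rfl, hpsi⟩
          have hlt : pvPos ((fl.map PySem.Str.strip).map String.toList) i <
              (PySem.Chars.find hay.toList needle.toList).toNat := by
            rw [hposEq]
            exact pvPos_strict hi (by rw [hlents]; exact hj0le)
          rw [← hhay, ← hneedle] at hinf
          exact hmin _ hlt hinf
        -- A's loop finds exactly j0
        rw [pvA_loop_eq, PySem.List.pyRange_one, List.find?_map]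
        rw [pvFind?_range_eq_some (p := (pvMatchB fl pat (pat.length : Int)) ∘ (fun j : Nat => (0 : Int) + ↑j))
          (j := j0) (by simpa using hj0lt)
          (by simp only [Function.comp_apply, zero_add]; exact (pvMatch_iff fl pat j0).mpr hpm0)
          hminline]
        simp only [Option.map_some]
        have hcount : PySem.Str.count (PySem.Str.slice hay none (some (PySem.Str.find hay needle))) "\n" = j0 := by
          rw [PySem.Str.count_eq, PySem.Str.find_eq]
          rw [show ("\n".toList : List Char) = ['\n'] from rfl]
          rw [PySem.Str.toList_slice, PySem.Chars.slice_eq_listSlice]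
          rw [PySem.List.slice_to _ hge]
          rw [hposEq, hhay]
          rw [pvCount_single]
          exact pvCount_take htsN hj0le'
        rw [hcount]
        simp only [pvA_body, zero_add, pvIndent_eq]
        rw [PySem.List.foldl_append_singleton_eq_map, List.nil_append]
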